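-- pv_equiv track=rewrite | github.com/andy1li/adventofcode | 2020/day09_sums.py | find_invalid
-- ===== SOURCE A (Python) =====
-- def find_invalid(data, window=25):
--     def is_valid(i):
--         A, n = data[i-window:i], data[i]
--         needs = {n-x: i for i, x in enumerate(A)}
--         return any(
--             x in needs and i != needs[x]
--             for i, x in enumerate(A)
--         )
--     return next( data[i]
--         for i in range(window, len(data))
--         if not is_valid(i)
--     )
-- ===== SOURCE B (Python) =====
-- def find_invalid(data, window=25):
--     for i in range(window, len(data)):
--         prev, n = data[i-window:i], data[i]
--         if not _has_pair(prev, n):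
--             return n
--
-- def _has_pair(A, n):
--     while A:
--         x, A = A[0], A[1:]
--         for y in A:
--             if x + y == n:
--                 return True
--     return False
-- ===== Notes on version B (the rewrite author's own statement) =====
-- stated objective: simpler
-- what changed: is_valid's complement dictionary (build a needs table, then a lookup pass with an index-inequality check) is replaced by a plain scan over all distinct unordered pairs of the window, and the outer next(generator) becomes an explicit for loop with early return.
import Mathlib
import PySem

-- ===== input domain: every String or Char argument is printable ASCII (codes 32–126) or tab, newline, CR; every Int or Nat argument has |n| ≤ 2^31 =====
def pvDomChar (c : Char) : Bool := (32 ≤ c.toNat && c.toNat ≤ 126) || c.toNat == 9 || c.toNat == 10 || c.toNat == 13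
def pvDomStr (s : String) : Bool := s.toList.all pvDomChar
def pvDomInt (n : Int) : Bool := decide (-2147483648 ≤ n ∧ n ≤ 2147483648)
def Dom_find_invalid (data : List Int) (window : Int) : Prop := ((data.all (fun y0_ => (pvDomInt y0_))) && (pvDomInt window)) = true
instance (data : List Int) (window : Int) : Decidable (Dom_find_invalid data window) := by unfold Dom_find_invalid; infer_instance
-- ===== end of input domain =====

-- B replaces the complement-dictionary validity check by a direct scan over distinct pairs (objective: simpler).

-- ===== PORT A =====
-- inner helper is_valid(i): build 'needs' dict, then any(x in needs and i != needs[x])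
def pvIsValid (data : List Int) (window : Int) (i : Int) : Bool :=
  let A := PySem.List.slice data (some (i - window)) (some i)
  let n := PySem.List.pyGetD data i 0
  let needs := (PySem.List.enumerate A 0).foldl
    (fun d (p : Int × Int) => d.insert (n - p.2) p.1) PySem.Dict.empty
  (PySem.List.enumerate A 0).any (fun p =>
    match needs.get? p.2 with
    | some j => decide (p.1 ≠ j)
    | none => false)

-- next(data[i] for i in range(window, len(data)) if not is_valid(i));
-- the none branch is Python's StopIteration, excluded by Pre_
def find_invalid (data : List Int) (window : Int) : Int :=
  match (PySem.List.pyRange window (data.length : Int) 1).find?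
      (fun i => ! pvIsValid data window i) with
  | some i => PySem.List.pyGetD data i 0
  | none => 0

-- ===== PORT B =====
-- _has_pair(A, n): while A: x, A = A[0], A[1:]; any(x + y == n for y in A)
def pvHasPair : List Int → Int → Bool
  | [], _ => false
  | x :: rest, n => rest.any (fun y => x + y == n) || pvHasPair rest n

-- for i in range(window, len(data)): if not _has_pair(data[i-window:i], data[i]): return n
-- falling off the loop (Python returns None) is outside Pre_; 0 there
def find_invalid_alt (data : List Int) (window : Int) : Int :=
  match (PySem.List.pyRange window (data.length : Int) 1).find?
      (fun i => ! pvHasPair (PySem.List.slice data (some (i - window)) (some i))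
                            (PySem.List.pyGetD data i 0)) with
  | some i => PySem.List.pyGetD data i 0
  | none => 0

-- ===== PRECONDITION & SPEC =====
-- Pre_ excludes exactly the inputs where A raises: window < -len(data) (IndexError on
-- data[i] at i = window) and, for window ≥ 0, the absence of any invalid position
-- (next() raises StopIteration).  For -len ≤ window < 0 A always returns.
def Pre_find_invalid (data : List Int) (window : Int) : Prop :=
  if window < 0 then -(data.length : Int) ≤ window
  else ∃ i ∈ List.range data.length, window ≤ (i : Int) ∧
    ∀ a ∈ List.range i, ∀ b ∈ List.range i,
      (i : Int) - window ≤ (a : Int) → a < b →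
      data.getD a 0 + data.getD b 0 ≠ data.getD i 0
instance (data : List Int) (window : Int) : Decidable (Pre_find_invalid data window) := by
  unfold Pre_find_invalid; infer_instance

def pvWitness_find_invalid : List Int × Int := ([1, 2, 3], 1)

def Spec_find_invalid (data : List Int) (window : Int) (out : Int) : Prop := out = find_invalid_alt data window
instance (data : List Int) (window : Int) (out : Int) : Decidable (Spec_find_invalid data window out) := by unfold Spec_find_invalid; infer_instance

-- ===== CLAIM (what is proved, stated in full; the proofs are below) =====
def Claim_equal_find_invalid : Prop := ∀ (data : List Int) (window : Int), Dom_find_invalid data window → Pre_find_invalid data window → Spec_find_invalid data window (find_invalid data window)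

-- ===== LEMMAS AND PROOFS =====

-- get? after a fold of inserts = last matching entry, else the initial dict
theorem pv_foldl_insert_get? {κ ν β : Type} [BEq κ] [LawfulBEq κ]
    (key : β → κ) (val : β → ν) :
    ∀ (l : List β) (d : PySem.Dict κ ν) (k : κ),
    ((l.foldl (fun d p => d.insert (key p) (val p)) d).get? k) =
      ((l.reverse.find? (fun p => key p == k)).map val).or (d.get? k) := by
  intro l
  induction l with
  | nil => intro d k; simp
  | cons p t ih =>
    intro d k
    simp only [List.foldl_cons, List.reverse_cons, List.find?_append]
    rw [ih]
    cases h : t.reverse.find? (fun p => key p == k) with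
    | some q => simp
    | none =>
      simp only [Option.map_none, Option.none_or]
      by_cases hk : key p == k
      · have : k = key p := (eq_of_beq hk).symm
        subst this
        simp [PySem.Dict.get?_insert_self, List.find?]
      · have hne : k ≠ key p := fun he => hk (by simp [he])
        simp [PySem.Dict.get?_insert_of_ne _ _ hne, List.find?, hk]

theorem pv_mem_enumerate_iff (A : List Int) (s : Int) (p : Int × Int) :
    p ∈ PySem.List.enumerate A s ↔
      ∃ k : Nat, k < A.length ∧ p.1 = s + (k : Int) ∧ p.2 = A.getD k 0 := by
  induction A generalizing s with
  | nil => simp [PySem.List.enumerate_nil]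
  | cons x t ih =>
    simp only [PySem.List.enumerate_cons, List.mem_cons, ih]
    constructor
    · rintro (rfl | ⟨k, hk, h1, h2⟩)
      · exact ⟨0, by simp⟩
      · exact ⟨k + 1, by simpa using hk, by push_cast at h1 ⊢; omega, by simpa using h2⟩
    · rintro ⟨k, hk, h1, h2⟩
      cases k with
      | zero =>
        left
        simp only [List.getD_cons_zero] at h2
        simp only [Nat.cast_zero, add_zero] at h1
        exact Prod.ext h1 h2
      | succ k =>
        right
        exact ⟨k, by simp at hk; omega, by push_cast at h1 ⊢; omega, by simpa using h2⟩

theorem pv_enumerate_pairwise (A : List Int) (s : Int) :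
    (PySem.List.enumerate A s).Pairwise (fun p q => p.1 < q.1) := by
  induction A generalizing s with
  | nil => simp [PySem.List.enumerate_nil]
  | cons x t ih =>
    simp only [PySem.List.enumerate_cons, List.pairwise_cons]
    refine ⟨fun q hq => ?_, ih (s + 1)⟩
    obtain ⟨k, _, h1, _⟩ := (pv_mem_enumerate_iff t (s + 1) q).1 hq
    simp only [h1]; omega

-- find? on a strictly-decreasing list returns the max-index match
theorem pv_find?_max {β : Type} (pred : β → Bool) (f : β → Int) :
    ∀ (l : List β), l.Pairwise (fun p q => f q < f p) → ∀ p, l.find? pred = some p →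
      pred p = true ∧ p ∈ l ∧ ∀ q ∈ l, pred q = true → f q ≤ f p := by
  intro l
  induction l with
  | nil => intro _ p h; simp at h
  | cons r t ih =>
    intro hpw p hf
    rw [List.pairwise_cons] at hpw
    by_cases hr : pred r
    · simp only [List.find?_cons, hr, Option.some.injEq] at hf
      subst hf
      refine ⟨hr, List.mem_cons_self, fun q hq _ => ?_⟩
      rcases List.mem_cons.1 hq with rfl | hq
      · exact le_refl _
      · exact le_of_lt (hpw.1 q hq)
    · simp only [List.find?_cons, Bool.eq_false_iff.2 hr] at hf
      obtain ⟨h1, h2, h3⟩ := ih hpw.2 p hf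
      refine ⟨h1, List.mem_cons_of_mem _ h2, fun q hq hpq => ?_⟩
      rcases List.mem_cons.1 hq with rfl | hq
      · exact absurd hpq (by simpa using hr)
      · exact h3 q hq hpq

theorem pv_hasPair_iff (A : List Int) (n : Int) :
    pvHasPair A n = true ↔
      ∃ a b : Nat, a < b ∧ b < A.length ∧ A.getD a 0 + A.getD b 0 = n := by
  induction A with
  | nil => simp [pvHasPair]
  | cons x t ih =>
    simp only [pvHasPair, Bool.or_eq_true, List.any_eq_true, beq_iff_eq, ih]
    constructor
    · rintro (⟨y, hy, hxy⟩ | ⟨a, b, hab, hb, hsum⟩)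
      · obtain ⟨k, hk, rfl⟩ := List.getElem_of_mem hy
        exact ⟨0, k + 1, by omega, by simp; omega,
          by simp [List.getD, List.getElem?_eq_getElem hk]; exact hxy⟩
      · exact ⟨a + 1, b + 1, by omega, by simp; omega, by simpa using hsum⟩
    · rintro ⟨a, b, hab, hb, hsum⟩
      cases a with
      | zero =>
        left
        obtain ⟨b', rfl⟩ : ∃ b', b = b' + 1 := ⟨b - 1, by omega⟩
        have hb' : b' < t.length := by simpa using hb
        refine ⟨t.getD b' 0, ?_, ?_⟩
        · rw [List.getD_eq_getElem t 0 hb']; exact List.getElem_mem hb'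
        · simpa using hsum
      | succ a' =>
        right
        obtain ⟨b', rfl⟩ : ∃ b', b = b' + 1 := ⟨b - 1, by omega⟩
        exact ⟨a', b', by omega, by simpa using hb, by simpa using hsum⟩

-- the core equivalence: A's dict-based any = B's pair scan, on any window A and target n
theorem pv_anyDict_eq_hasPair (A : List Int) (n : Int) :
    ((PySem.List.enumerate A 0).any (fun p =>
      match ((PySem.List.enumerate A 0).foldl
          (fun d (p : Int × Int) => d.insert (n - p.2) p.1) PySem.Dict.empty).get? p.2 with
      | some j => decide (p.1 ≠ j)
      | none => false)) = pvHasPair A n := by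
  have hget : ∀ k, ((PySem.List.enumerate A 0).foldl
      (fun d (p : Int × Int) => d.insert (n - p.2) p.1) PySem.Dict.empty).get? k =
      (((PySem.List.enumerate A 0).reverse.find? (fun p => n - p.2 == k)).map (·.1)) := by
    intro k
    rw [pv_foldl_insert_get? (fun p : Int × Int => n - p.2) (fun p : Int × Int => p.1)]
    simp
  have hpw : (PySem.List.enumerate A 0).reverse.Pairwise
      (fun p q : Int × Int => q.1 < p.1) :=
    (List.pairwise_reverse).2 (pv_enumerate_pairwise A 0)
  rw [Bool.eq_iff_iff, List.any_eq_true, pv_hasPair_iff]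
  constructor
  · rintro ⟨p, hp, hmatch⟩
    cases hq : ((PySem.List.enumerate A 0).foldl
        (fun d (p : Int × Int) => d.insert (n - p.2) p.1) PySem.Dict.empty).get? p.2 with
    | none => rw [hq] at hmatch; simp at hmatch
    | some j =>
      rw [hq] at hmatch
      have hpj : p.1 ≠ j := by simpa using hmatch
      rw [hget] at hq
      cases hfind : (PySem.List.enumerate A 0).reverse.find? (fun q => n - q.2 == p.2) with
      | none => rw [hfind] at hq; simp at hq
      | some q =>
        rw [hfind] at hq
        obtain ⟨hpred, hqmem, _⟩ := pv_find?_max _ (·.1) _ hpw q hfind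
        have hq1 : q.1 = j := by simpa using hq
        have hqmem' : q ∈ PySem.List.enumerate A 0 := List.mem_reverse.1 hqmem
        obtain ⟨a, ha, hp1, hp2⟩ := (pv_mem_enumerate_iff A 0 p).1 hp
        obtain ⟨c, hc, hq1', hq2⟩ := (pv_mem_enumerate_iff A 0 q).1 hqmem'
        have hsum : A.getD a 0 + A.getD c 0 = n := by
          have : n - q.2 = p.2 := by simpa using hpred
          rw [hp2, hq2] at this; omega
        have hac : a ≠ c := by
          intro he; apply hpj; rw [← hq1, hp1, hq1', he]
        rcases lt_or_gt_of_ne hac with h | h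
        · exact ⟨a, c, h, hc, hsum⟩
        · exact ⟨c, a, h, ha, by omega⟩
  · rintro ⟨a, b, hab, hb, hsum⟩
    have ha : a < A.length := by omega
    refine ⟨((a : Int), A.getD a 0), (pv_mem_enumerate_iff A 0 _).2 ⟨a, ha, by simp, rfl⟩, ?_⟩
    have hqb : ((b : Int), A.getD b 0) ∈ (PySem.List.enumerate A 0).reverse :=
      List.mem_reverse.2 ((pv_mem_enumerate_iff A 0 _).2 ⟨b, hb, by simp, rfl⟩)
    have hpredb : (fun p : Int × Int => n - p.2 == A.getD a 0) ((b : Int), A.getD b 0) = true := by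
      simp only [beq_iff_eq]; omega
    have hsome : ((PySem.List.enumerate A 0).reverse.find?
        (fun p => n - p.2 == A.getD a 0)).isSome :=
      List.find?_isSome.2 ⟨_, hqb, hpredb⟩
    cases hfind : (PySem.List.enumerate A 0).reverse.find? (fun p => n - p.2 == A.getD a 0) with
    | none => rw [hfind] at hsome; simp at hsome
    | some q =>
      obtain ⟨_, _, hmax⟩ := pv_find?_max _ (·.1) _ hpw q hfind
      have hbq : (b : Int) ≤ q.1 := hmax _ hqb hpredb
      rw [hget, hfind]
      simp only [Option.map_some]
      have : (a : Int) ≠ q.1 := by omega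
      simpa using this

theorem pv_ports_eq (data : List Int) (window : Int) :
    find_invalid data window = find_invalid_alt data window := by
  unfold find_invalid find_invalid_alt
  have hfun : (fun i => ! pvIsValid data window i) =
      (fun i => ! pvHasPair (PySem.List.slice data (some (i - window)) (some i))
                            (PySem.List.pyGetD data i 0)) := by
    funext i
    unfold pvIsValid
    rw [pv_anyDict_eq_hasPair]
  rw [hfun]

-- ===== VERDICT (by name: the statement is the Claim_ definition above) =====
theorem find_invalid_spec : Claim_equal_find_invalid := by
  unfold Claim_equal_find_invalid Spec_find_invalid
  intro data window _ _
  exact pv_ports_eq data window
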